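-- pv_equiv track=rewrite | github.com/teamWSIZ/python1-2020 | algorytmy/sudoku/encoding.py | decode_row
-- ===== SOURCE A (Python) =====
-- from typing import List
--
-- def decode_row(x: int) -> List[int]:
--     row = []
--     for i in range(4):
--         row.append(1 + (x & 0b11))
--         x >>= 2
--     row = row[::-1]
--
--     for i in range(4):
--         mask = x & 0b1
--         x >>= 1
--         if mask == 0:
--             row[3 - i] = 0
--     return row
-- ===== SOURCE B (Python) =====
-- from typing import List
--
-- def decode_row(x: int) -> List[int]:
--     # one pass: element k is 0 if presence bit (11-k) is clear,
--     # else 1 + the 2-bit group at offset 6-2k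
--     return [1 + ((x >> (6 - 2 * k)) & 3) if (x >> (11 - k)) & 1 else 0
--             for k in range(4)]
-- ===== Notes on version B (the rewrite author's own statement) =====
-- stated objective: simpler
-- what changed: A builds the row in two sequential loops with a list reversal and in-place overwrites, mutating x as it goes; B is a single comprehension that reads each element directly from closed-form fixed bit offsets of the unchanged x.
import Mathlib
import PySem

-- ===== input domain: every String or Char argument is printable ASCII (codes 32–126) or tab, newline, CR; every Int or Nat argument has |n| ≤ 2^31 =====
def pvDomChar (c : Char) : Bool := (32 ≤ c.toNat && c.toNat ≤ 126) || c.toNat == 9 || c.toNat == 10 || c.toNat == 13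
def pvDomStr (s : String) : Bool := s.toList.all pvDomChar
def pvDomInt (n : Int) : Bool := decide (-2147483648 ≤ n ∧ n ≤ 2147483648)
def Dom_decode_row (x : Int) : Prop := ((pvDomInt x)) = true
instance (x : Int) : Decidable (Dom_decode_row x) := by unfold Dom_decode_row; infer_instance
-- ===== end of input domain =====

-- B replaces A's two loops + list reversal + in-place overwrites by one pass reading each element from closed-form bit offsets (objective: simpler).

-- ===== PORT A =====
def decode_row (x : Int) : List Int :=
  -- first loop: row.append(1 + (x & 0b11)); x >>= 2   (x & c is PySem.Int.band; x >> k is core's >>> with k : Nat)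
  let s1 := (List.range 4).foldl
    (fun (s : List Int × Int) _ => (s.1 ++ [1 + PySem.Int.band s.2 3], s.2 >>> (2 : Nat)))
    ([], x)
  -- row = row[::-1] is reversal (PySem.List.slice?_none_none_neg_one)
  -- second loop: mask = x & 1; x >>= 1; if mask == 0: row[3-i] = 0  (index 3-i always in range → List.set, exact)
  let s2 := (List.range 4).foldl
    (fun (s : List Int × Int) i =>
      let mask := PySem.Int.band s.2 1
      (if mask = 0 then s.1.set (3 - i) 0 else s.1, s.2 >>> (1 : Nat)))
    (s1.1.reverse, s1.2)
  s2.1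

-- ===== PORT B =====
-- Python's x >> n (n ≥ 0) is core's Int-by-Nat arithmetic shift; this helper pins that instance
def pvShr (a : Int) (n : Nat) : Int := a >>> n

def decode_row_alt (x : Int) : List Int :=
  -- shift amounts 11-k and 6-2k are nonnegative for k in range(4), so .toNat is exact
  (PySem.List.pyRange 0 4 1).map (fun k =>
    if PySem.Int.band (pvShr x (11 - k).toNat) 1 ≠ 0
    then 1 + PySem.Int.band (pvShr x (6 - 2 * k).toNat) 3
    else 0)

-- ===== PRECONDITION & SPEC =====
def Spec_decode_row (x : Int) (out : List Int) : Prop := out = decode_row_alt x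
instance (x : Int) (out : List Int) : Decidable (Spec_decode_row x out) := by unfold Spec_decode_row; infer_instance

-- ===== CLAIM (what is proved, stated in full; the proofs are below) =====
def Claim_equal_decode_row : Prop := ∀ (x : Int), Dom_decode_row x → Spec_decode_row x (decode_row x)

-- ===== LEMMAS AND PROOFS =====

-- Python's a & 0b11 is a mod 4 (two's complement), on every Int
theorem pv_band_three (a : Int) : PySem.Int.band a 3 = a % 4 := by
  have h2 : ∀ n : Nat, n &&& 3 = n % 4 := by
    intro n
    have := Nat.and_two_pow_sub_one_eq_mod n 2
    norm_num at this
    omega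
  unfold PySem.Int.band
  split_ifs with h h' h'
  · rw [show ((3:Int).toNat) = 3 from rfl, h2]; omega
  · omega
  · rw [show ((3:Int).toNat) = 3 from rfl, Nat.and_comm, h2]; omega
  · omega

-- Python's a & 1 is a mod 2, on every Int
theorem pv_band_one' (a : Int) : PySem.Int.band a 1 = a % 2 := by
  rw [PySem.Int.band_one a]
  simp [PySem.Int.mod, Int.fmod_eq_emod]

-- closed form of A's first loop (pure unfolding)
theorem pv_loop1 (x : Int) :
  ((List.range 4).foldl
    (fun (s : List Int × Int) _ => (s.1 ++ [1 + PySem.Int.band s.2 3], s.2 >>> (2 : Nat)))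
    ([], x)) =
  ([1 + PySem.Int.band x 3, 1 + PySem.Int.band (x >>> (2:Nat)) 3,
    1 + PySem.Int.band (x >>> (2:Nat) >>> (2:Nat)) 3,
    1 + PySem.Int.band (x >>> (2:Nat) >>> (2:Nat) >>> (2:Nat)) 3],
   x >>> (2:Nat) >>> (2:Nat) >>> (2:Nat) >>> (2:Nat)) := rfl

-- closed form of A's second loop on a 4-element row: element j is zeroed iff bit 3-j of v is clear
theorem pv_loop2 (l0 l1 l2 l3 v : Int) :
  ((List.range 4).foldl (fun (s : List Int × Int) i =>
      let mask := PySem.Int.band s.2 1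
      (if mask = 0 then s.1.set (3 - i) 0 else s.1, s.2 >>> (1 : Nat)))
    ([l0,l1,l2,l3], v)).1 =
  [if PySem.Int.band (v >>> (1:Nat) >>> (1:Nat) >>> (1:Nat)) 1 = 0 then 0 else l0,
   if PySem.Int.band (v >>> (1:Nat) >>> (1:Nat)) 1 = 0 then 0 else l1,
   if PySem.Int.band (v >>> (1:Nat)) 1 = 0 then 0 else l2,
   if PySem.Int.band v 1 = 0 then 0 else l3] := by
  simp only [List.range_succ, List.range_zero, List.nil_append, List.foldl_append,
    List.foldl_cons, List.foldl_nil]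
  split_ifs <;> rfl

-- ===== VERDICT (by name: the statement is the Claim_ definition above) =====
theorem decode_row_spec : Claim_equal_decode_row := by
  intro x _
  have hr : PySem.List.pyRange 0 4 1 = [0, 1, 2, 3] := by decide
  unfold Spec_decode_row
  simp only [decode_row, decode_row_alt]
  rw [hr, pv_loop1]
  simp only [List.map, List.reverse_cons, List.reverse_nil, List.nil_append, List.cons_append]
  norm_num
  rw [pv_loop2]
  norm_num
  simp only [pvShr, pv_band_three, pv_band_one', Int.shiftRight_eq_div_pow,
    show ((11:Int)).toNat = 11 from rfl, show ((10:Int)).toNat = 10 from rfl,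
    show ((9:Int)).toNat = 9 from rfl, show ((8:Int)).toNat = 8 from rfl,
    show ((6:Int)).toNat = 6 from rfl, show ((4:Int)).toNat = 4 from rfl,
    show ((2:Int)).toNat = 2 from rfl]
  norm_num
  refine ⟨?_, ?_, ?_, ?_⟩ <;> (split_ifs <;> omega)
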